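-- pv_equiv track=rewrite | github.com/ericjepsen9/rag-test | query_rewrite.py | _build_history_summary_and_pairs
-- ===== SOURCE A (Python) =====
-- from typing import Dict, Any, List, Optional
--
-- def _build_history_summary_and_pairs(
--     history: List[Dict], max_turns: int = 3, max_pairs: int = 3
-- ) -> tuple:
--     """单次反向扫描同时构建多轮摘要和 Q&A 对，避免两次独立遍历。
--
--     返回 (summary: str, pairs: List[Dict])。
--     summary: "菲罗奥成分是什么 → 安全吗 → 术后注意什么" 格式。
--     pairs: [{"user": "...", "assistant": "..."}, ...] 格式。
--     """
--     recent_questions: List[str] = []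
--     pairs: List[Dict] = []
--     current_assistant = ""
--     summary_done = False
--     pairs_done = False
--
--     for item in reversed(history):
--         if summary_done and pairs_done:
--             break
--         role = item.get("role", "")
--         raw = item.get("content")
--         content = (str(raw) if raw is not None else "").strip()
--
--         if role == "assistant":
--             if not pairs_done and not current_assistant:
--                 current_assistant = content[:200]
--         elif role == "user":
--             if not summary_done and content:
--                 recent_questions.append(content)
--                 if len(recent_questions) >= max_turns:
--                     summary_done = True
--             if not pairs_done and current_assistant:
--                 pairs.append({"user": content, "assistant": current_assistant})
--                 current_assistant = ""
--                 if len(pairs) >= max_pairs: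
--                     pairs_done = True
--
--     recent_questions.reverse()
--     pairs.reverse()
--     return " → ".join(recent_questions), pairs
-- ===== SOURCE B (Python) =====
-- from typing import Dict, List
--
-- def _build_history_summary_and_pairs(
--     history: List[Dict], max_turns: int = 3, max_pairs: int = 3
-- ) -> tuple:
--     """Two independent reverse scans (questions pass, pairs pass) instead of one fused loop."""
--
--     def _content(item):
--         raw = item.get("content")
--         return (str(raw) if raw is not None else "").strip()
--
--     # Pass 1: most recent non-empty user questions, newest-first, then reversed.
--     recent_questions: List[str] = []
--     for item in reversed(history):
--         if item.get("role", "") == "user":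
--             content = _content(item)
--             if content:
--                 recent_questions.append(content)
--                 if len(recent_questions) >= max_turns:
--                     break
--     recent_questions.reverse()
--
--     # Pass 2: pair each user turn with the nearest following assistant reply.
--     pairs: List[Dict] = []
--     current_assistant = ""
--     for item in reversed(history):
--         role = item.get("role", "")
--         if role == "assistant":
--             if not current_assistant:
--                 current_assistant = _content(item)[:200]
--         elif role == "user" and current_assistant:
--             pairs.append({"user": _content(item), "assistant": current_assistant})
--             current_assistant = ""
--             if len(pairs) >= max_pairs:
--                 break
--     pairs.reverse()
--
--     return " → ".join(recent_questions), pairs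
-- ===== Notes on version B (the rewrite author's own statement) =====
-- stated objective: simpler
-- what changed: A's single fused reverse scan carrying five pieces of coupled loop state (two done-flags, shared break) is split into two independent reverse scans, one building the recent-questions summary and one building the Q&A pairs, each with its own plain break.
import Mathlib
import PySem

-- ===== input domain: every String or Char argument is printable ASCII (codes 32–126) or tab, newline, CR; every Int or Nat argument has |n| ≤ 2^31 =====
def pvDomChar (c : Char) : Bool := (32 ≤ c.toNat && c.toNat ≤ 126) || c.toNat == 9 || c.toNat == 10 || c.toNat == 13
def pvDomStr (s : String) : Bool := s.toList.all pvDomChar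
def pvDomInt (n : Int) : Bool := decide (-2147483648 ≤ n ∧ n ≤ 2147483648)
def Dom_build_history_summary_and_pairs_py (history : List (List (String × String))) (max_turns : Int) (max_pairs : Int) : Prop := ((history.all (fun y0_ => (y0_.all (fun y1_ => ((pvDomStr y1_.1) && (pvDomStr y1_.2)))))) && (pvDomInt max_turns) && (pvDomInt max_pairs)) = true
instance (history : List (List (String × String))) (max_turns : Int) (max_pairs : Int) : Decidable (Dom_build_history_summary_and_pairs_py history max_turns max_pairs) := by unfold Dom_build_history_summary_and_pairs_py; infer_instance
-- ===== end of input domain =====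

-- B replaces A's fused single reverse scan (five pieces of loop state) by two independent
-- reverse scans, one per output; objective: simpler. Equivalence of the return values is proved.

-- item.get(k) : first match in the association list (dicts arrive as assoc lists)
def pvGet? (item : List (String × String)) (k : String) : Option String :=
  (item.find? (fun p => p.1 = k)).map (·.2)

-- content = (str(raw) if raw is not None else "").strip()
def pvContent (item : List (String × String)) : String :=
  PySem.Str.strip ((pvGet? item "content").getD "")

-- content[:200]
def pvTake200 (s : String) : String :=
  String.ofList (PySem.List.slice s.toList none (some 200))

-- ===== PORT A =====
-- A's fused loop over reversed(history); state = (recent_questions, pairs, current_assistant,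
-- summary_done, pairs_done); the `break` is the early return when both flags hold.
def pvLoopA (mt mp : Int) :
    List (List (String × String)) →
    List String × List (List (String × String)) × String × Bool × Bool →
    List String × List (List (String × String)) × String × Bool × Bool
  | [], s => s
  | item :: rest, (qs, prs, ca, sd, pd) =>
    if sd && pd then (qs, prs, ca, sd, pd)
    else
      let role := (pvGet? item "role").getD ""
      let content := pvContent item
      if role = "assistant" then
        let ca' := if !pd && ca = "" then pvTake200 content else ca
        pvLoopA mt mp rest (qs, prs, ca', sd, pd)
      else if role = "user" then
        let qs' := if !sd && content ≠ "" then qs ++ [content] else qs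
        let sd' := if !sd && content ≠ "" then (if (qs'.length : Int) ≥ mt then true else sd) else sd
        let prs' := if !pd && ca ≠ "" then prs ++ [[("user", content), ("assistant", ca)]] else prs
        let ca' := if !pd && ca ≠ "" then "" else ca
        let pd' := if !pd && ca ≠ "" then (if (prs'.length : Int) ≥ mp then true else pd) else pd
        pvLoopA mt mp rest (qs', prs', ca', sd', pd')
      else pvLoopA mt mp rest (qs, prs, ca, sd, pd)

def build_history_summary_and_pairs_py (history : List (List (String × String))) (max_turns : Int) (max_pairs : Int) : String × (List (List (String × String))) :=
  (PySem.Str.join " → " (pvLoopA max_turns max_pairs history.reverse ([], [], "", false, false)).1.reverse,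
   (pvLoopA max_turns max_pairs history.reverse ([], [], "", false, false)).2.1.reverse)

-- ===== PORT B =====
-- pass 1: collect most recent non-empty user questions, break once max_turns reached
def pvQLoop (mt : Int) : List (List (String × String)) → List String → List String
  | [], qs => qs
  | item :: rest, qs =>
    if (pvGet? item "role").getD "" = "user" then
      let content := pvContent item
      if content ≠ "" then
        let qs' := qs ++ [content]
        if (qs'.length : Int) ≥ mt then qs' else pvQLoop mt rest qs'
      else pvQLoop mt rest qs
    else pvQLoop mt rest qs

-- pass 2: pair each user turn with the nearest following assistant reply
def pvPLoop (mp : Int) :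
    List (List (String × String)) → List (List (String × String)) → String →
    List (List (String × String))
  | [], prs, _ => prs
  | item :: rest, prs, ca =>
    let role := (pvGet? item "role").getD ""
    if role = "assistant" then
      pvPLoop mp rest prs (if ca = "" then pvTake200 (pvContent item) else ca)
    else if role = "user" ∧ ca ≠ "" then
      let prs' := prs ++ [[("user", pvContent item), ("assistant", ca)]]
      if (prs'.length : Int) ≥ mp then prs' else pvPLoop mp rest prs' ""
    else pvPLoop mp rest prs ca

def build_history_summary_and_pairs_py_alt (history : List (List (String × String))) (max_turns : Int) (max_pairs : Int) : String × (List (List (String × String))) :=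
  (PySem.Str.join " → " (pvQLoop max_turns history.reverse []).reverse,
   (pvPLoop max_pairs history.reverse [] "").reverse)

-- ===== PRECONDITION & SPEC =====
def Spec_build_history_summary_and_pairs_py (history : List (List (String × String))) (max_turns : Int) (max_pairs : Int) (out : String × (List (List (String × String)))) : Prop := out = build_history_summary_and_pairs_py_alt history max_turns max_pairs
instance (history : List (List (String × String))) (max_turns : Int) (max_pairs : Int) (out : String × (List (List (String × String)))) : Decidable (Spec_build_history_summary_and_pairs_py history max_turns max_pairs out) := by unfold Spec_build_history_summary_and_pairs_py; infer_instance

-- ===== CLAIM (what is proved, stated in full; the proofs are below) =====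
def Claim_equal_build_history_summary_and_pairs_py : Prop := ∀ (history : List (List (String × String))) (max_turns : Int) (max_pairs : Int), Dom_build_history_summary_and_pairs_py history max_turns max_pairs → Spec_build_history_summary_and_pairs_py history max_turns max_pairs (build_history_summary_and_pairs_py history max_turns max_pairs)

-- ===== LEMMAS AND PROOFS =====

-- once summary_done holds, the questions component is frozen
theorem pvLoopA_qs_frozen (mt mp : Int) (items : List (List (String × String)))
    (qs : List String) :
    ∀ prs ca pd, (pvLoopA mt mp items (qs, prs, ca, true, pd)).1 = qs := by
  induction items with
  | nil => intro prs ca pd; rfl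
  | cons item rest ih =>
    intro prs ca pd
    simp only [pvLoopA]
    split_ifs <;> simp_all

-- once pairs_done holds, the pairs component is frozen
theorem pvLoopA_prs_frozen (mt mp : Int) (items : List (List (String × String)))
    (prs : List (List (String × String))) :
    ∀ qs ca sd, (pvLoopA mt mp items (qs, prs, ca, sd, true)).2.1 = prs := by
  induction items with
  | nil => intro qs ca sd; rfl
  | cons item rest ih =>
    intro qs ca sd
    simp only [pvLoopA]
    split_ifs <;> simp_all

-- while summary_done is false, A's questions component is B's questions pass
theorem pvLoopA_qs (mt mp : Int) (items : List (List (String × String))) :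
    ∀ qs prs ca pd, (pvLoopA mt mp items (qs, prs, ca, false, pd)).1 = pvQLoop mt items qs := by
  induction items with
  | nil => intro qs prs ca pd; rfl
  | cons item rest ih =>
    intro qs prs ca pd
    simp only [pvLoopA, pvQLoop]
    cases pd <;> split_ifs <;> simp_all [pvLoopA_qs_frozen]

-- while pairs_done is false, A's pairs component is B's pairs pass
theorem pvLoopA_prs (mt mp : Int) (items : List (List (String × String))) :
    ∀ prs ca qs sd, (pvLoopA mt mp items (qs, prs, ca, sd, false)).2.1 = pvPLoop mp items prs ca := by
  induction items with
  | nil => intro prs ca qs sd; rfl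
  | cons item rest ih =>
    intro prs ca qs sd
    simp only [pvLoopA, pvPLoop]
    cases sd <;> split_ifs <;> simp_all [pvLoopA_prs_frozen]

-- ===== VERDICT (by name: the statement is the Claim_ definition above) =====
theorem build_history_summary_and_pairs_py_spec : Claim_equal_build_history_summary_and_pairs_py := by
  intro history mt mp _
  unfold Spec_build_history_summary_and_pairs_py
  unfold build_history_summary_and_pairs_py build_history_summary_and_pairs_py_alt
  rw [pvLoopA_qs, pvLoopA_prs]
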